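-- pv_equiv track=rewrite | github.com/hehesam/ACM-rep | leetCode/AmazoneInterveiw/Count Unique Characters of All Substrings of a Given String.py | way2
-- ===== SOURCE A (Python) =====
-- def way2(S):
--     res=[0]*(len(S)+1)
--     idxs=[[-1,-1]]*26
--     for i,c in enumerate(S):
--         code=ord(c)-ord('A')
--         first,second=idxs[code]
--         res[i+1]=1+res[i]+(i-1-second)-(second-first)
--         idxs[code]=[second,i]
--     # return sum(res)%(10**9+7)
--     return sum(res)
-- ===== SOURCE B (Python) =====
-- def way2(S):
--     n = len(S)
--     state = [(-1, -1)] * 26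
--     acc = 0
--     for i, c in enumerate(S):
--         code = ord(c) - ord('A')
--         first, second = state[code]
--         acc += (second - first) * (i - second)
--         state[code] = (second, i)
--     for first, second in state:
--         acc += (second - first) * (n - second)
--     return acc
-- ===== Notes on version B (the rewrite author's own statement) =====
-- stated objective: alternative
-- what changed: B drops A's length-(n+1) prefix-count array res entirely: it keeps one running accumulator, adding each occurrence's contribution (second-first)*(i-second) when the next occurrence of that letter closes it, plus a final flush pass over the 26 slots with n as the closing boundary.
import Mathlib
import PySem

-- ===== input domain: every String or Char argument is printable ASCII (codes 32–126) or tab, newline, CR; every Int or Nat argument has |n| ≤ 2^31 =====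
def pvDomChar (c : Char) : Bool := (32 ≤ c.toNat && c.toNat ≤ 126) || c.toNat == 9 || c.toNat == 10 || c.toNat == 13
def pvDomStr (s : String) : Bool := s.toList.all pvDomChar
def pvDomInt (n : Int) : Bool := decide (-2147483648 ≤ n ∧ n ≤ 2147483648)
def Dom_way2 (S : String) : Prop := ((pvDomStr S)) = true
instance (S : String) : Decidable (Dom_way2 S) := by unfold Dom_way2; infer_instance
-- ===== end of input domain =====

-- B keeps one accumulator (contribution added when an occurrence is "closed" + a final flush
-- over the 26 slots) instead of A's length-(n+1) prefix-count array summed at the end.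

-- ===== PORT A =====
-- A preallocates res=[0]*(n+1) and writes res[i+1] each iteration; the port carries the res
-- list and writes with Python list-assignment semantics (PySem.List.pySetD, index always in
-- range on the real run). idxs[code] with a possibly negative code uses pyGetD/pySetD, exact
-- Python wraparound; out-of-range codes (IndexError in Python) are excluded by Pre_way2.
def way2Loop (cs : List Char) (i : Nat) (res : List Int) (idxs : List (Int × Int)) :
    List Int × List (Int × Int) :=
  match cs with
  | [] => (res, idxs)
  | c :: rest =>
    let code : Int := (c.toNat : Int) - 65
    let p := PySem.List.pyGetD idxs code (-1, -1)      -- first,second = idxs[code]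
    let v : Int := 1 + PySem.List.pyGetD res (i : Int) 0 + ((i : Int) - 1 - p.2) - (p.2 - p.1)
    way2Loop rest (i + 1) (PySem.List.pySetD res ((i : Int) + 1) v)
      (PySem.List.pySetD idxs code (p.2, (i : Int)))

def way2 (S : String) : Int :=
  ((way2Loop S.toList 0 (List.replicate (S.toList.length + 1) 0)
      (List.replicate 26 ((-1 : Int), (-1 : Int)))).1).sum

-- ===== PORT B =====
def way2AltLoop (cs : List Char) (i : Nat) (state : List (Int × Int)) (acc : Int) :
    List (Int × Int) × Int :=
  match cs with
  | [] => (state, acc)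
  | c :: rest =>
    let code : Int := (c.toNat : Int) - 65
    let p := PySem.List.pyGetD state code (-1, -1)     -- first,second = state[code]
    way2AltLoop rest (i + 1) (PySem.List.pySetD state code (p.2, (i : Int)))
      (acc + (p.2 - p.1) * ((i : Int) - p.2))

def way2_alt (S : String) : Int :=
  let n := S.toList.length
  let r := way2AltLoop S.toList 0 (List.replicate 26 ((-1 : Int), (-1 : Int))) 0
  r.1.foldl (fun a p => a + (p.2 - p.1) * ((n : Int) - p.2)) r.2

-- ===== PRECONDITION & SPEC =====
-- Pre_way2 excludes exactly the strings containing a character with code outside 39..90: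
-- there idxs[ord(c)-65] is an out-of-range Python index and both A and B raise IndexError.
def Pre_way2 (S : String) : Prop := (S.toList.all (fun c => 39 ≤ c.toNat && c.toNat ≤ 90)) = true
instance (S : String) : Decidable (Pre_way2 S) := by unfold Pre_way2; infer_instance
def pvWitness_way2 : String := "AB@"
def Spec_way2 (S : String) (out : Int) : Prop := out = way2_alt S
instance (S : String) (out : Int) : Decidable (Spec_way2 S out) := by unfold Spec_way2; infer_instance

-- ===== CLAIM (what is proved, stated in full; the proofs are below) =====
def Claim_equal_way2 : Prop := ∀ (S : String), Dom_way2 S → Pre_way2 S → Spec_way2 S (way2 S)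

-- ===== LEMMAS AND PROOFS =====

-- sum of (second - first) over the 26 slots
def sig26 (idxs : List (Int × Int)) : Int := (idxs.map (fun p => p.2 - p.1)).sum
-- sum of (second - first) * (m - second) over the 26 slots
def gapF (idxs : List (Int × Int)) (m : Int) : Int :=
  (idxs.map (fun p => (p.2 - p.1) * (m - p.2))).sum

theorem sum_map_set {α : Type} (g : α → Int) :
    ∀ (l : List α) (j : Nat) (v : α) (h : j < l.length),
      ((l.set j v).map g).sum = (l.map g).sum - g (l[j]'h) + g v := by
  intro l
  induction l with
  | nil => intro j v h; simp at h
  | cons x xs ih =>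
    intro j v h
    cases j with
    | zero => simp [List.set]; ring
    | succ j =>
      have hj : j < xs.length := by simpa using h
      simp only [List.set_cons_succ, List.map_cons, List.sum_cons, ih j v hj,
        List.getElem_cons_succ]
      ring

theorem gapF_succ (idxs : List (Int × Int)) (m : Int) :
    gapF idxs (m + 1) = gapF idxs m + sig26 idxs := by
  unfold gapF sig26
  induction idxs with
  | nil => simp
  | cons p rest ih => simp [ih]; ring

theorem foldl_add_gap (n : Int) :
    ∀ (l : List (Int × Int)) (a : Int),
      l.foldl (fun a p => a + (p.2 - p.1) * (n - p.2)) a = a + gapF l n := by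
  intro l
  induction l with
  | nil => intro a; simp [gapF]
  | cons p rest ih =>
    intro a
    simp only [List.foldl_cons, ih, gapF, List.map_cons, List.sum_cons]
    ring

-- normalized Python index into the 26-slot list
theorem pyIdx26 (code : Int) (h1 : -26 ≤ code) (h2 : code < 26) :
    PySem.List.pyIdx? 26 code = some (if 0 ≤ code then code.toNat else 26 - (-code).toNat) ∧
    (if 0 ≤ code then code.toNat else 26 - (-code).toNat) < 26 := by
  unfold PySem.List.pyIdx?
  by_cases h : 0 ≤ code <;> simp [h] <;> omega

theorem pyGetD26 (idxs : List (Int × Int)) (code : Int) (d : Int × Int)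
    (hl : idxs.length = 26) (h1 : -26 ≤ code) (h2 : code < 26) :
    PySem.List.pyGetD idxs code d =
      idxs.getD (if 0 ≤ code then code.toNat else 26 - (-code).toNat) d := by
  obtain ⟨hidx, hlt⟩ := pyIdx26 code h1 h2
  unfold PySem.List.pyGetD PySem.List.pyGet?
  rw [hl, hidx]
  simp [List.getD, List.getElem?_eq_getElem (by omega : (if 0 ≤ code then code.toNat else 26 - (-code).toNat) < idxs.length)]

theorem pySetD26 (idxs : List (Int × Int)) (code : Int) (v : Int × Int)
    (hl : idxs.length = 26) (h1 : -26 ≤ code) (h2 : code < 26) :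
    PySem.List.pySetD idxs code v =
      idxs.set (if 0 ≤ code then code.toNat else 26 - (-code).toNat) v := by
  obtain ⟨hidx, _⟩ := pyIdx26 code h1 h2
  unfold PySem.List.pySetD PySem.List.pySet?
  rw [hl, hidx]
  rfl

-- writing at res[i+1] = r.length when res = r ++ 0 :: zeros
theorem pySetD_append (r : List Int) (z : Nat) (v : Int) (i : Nat) (hr : r.length = i + 1) :
    PySem.List.pySetD (r ++ List.replicate (z + 1) 0) ((i : Int) + 1) v
      = (r ++ [v]) ++ List.replicate z 0 := by
  have : ((i : Int) + 1) = ((i + 1 : Nat) : Int) := by push_cast; ring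
  rw [this, PySem.List.pySetD_natCast]
  rw [← hr]
  rw [List.replicate_succ, List.set_append_right _ _ (by omega)]
  simp

-- reading res[i] when res = r ++ zeros and r.length = i+1
theorem pyGetD_append (r : List Int) (z : Nat) (i : Nat) (hr : r.length = i + 1) :
    PySem.List.pyGetD (r ++ List.replicate z 0) (i : Int) 0 = r.getD i 0 := by
  rw [PySem.List.pyGetD_natCast]
  simp [List.getD, List.getElem?_append_left (by omega : i < r.length)]

-- The joint loop invariant: A's running res-sum equals B's accumulator plus the pending
-- contributions gapF of the 26 slots at the current boundary i.
theorem loop_inv :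
    ∀ (cs : List Char) (i : Nat) (r : List Int) (idxs : List (Int × Int)) (acc : Int),
      idxs.length = 26 →
      r.length = i + 1 →
      (∀ c ∈ cs, 39 ≤ c.toNat ∧ c.toNat ≤ 90) →
      r.getD i 0 = sig26 idxs →
      r.sum = acc + gapF idxs (i : Int) →
      ((way2Loop cs i (r ++ List.replicate cs.length 0) idxs).1).sum
        = (way2AltLoop cs i idxs acc).2
          + gapF (way2AltLoop cs i idxs acc).1 ((i : Int) + cs.length) := by
  intro cs
  induction cs with
  | nil =>
    intro i r idxs acc _ _ _ _ hsum
    simpa [way2Loop, way2AltLoop] using hsum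
  | cons c rest ih =>
    intro i r idxs acc hl hr hpre hlast hsum
    obtain ⟨hc1, hc2⟩ := hpre c (by simp)
    have hpre' : ∀ x ∈ rest, 39 ≤ x.toNat ∧ x.toNat ≤ 90 := fun x hx => hpre x (by simp [hx])
    set code : Int := (c.toNat : Int) - 65 with hcode
    have hcl : -26 ≤ code := by omega
    have hcu : code < 26 := by omega
    set j : Nat := if 0 ≤ code then code.toNat else 26 - (-code).toNat with hj
    have hjlt : j < 26 := (pyIdx26 code hcl hcu).2
    have hjlt' : j < idxs.length := by omega
    set p : Int × Int := idxs[j]'hjlt' with hp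
    have hget : PySem.List.pyGetD idxs code ((-1 : Int), (-1 : Int)) = p := by
      rw [pyGetD26 idxs code _ hl hcl hcu, ← hj, hp]
      simp [List.getD, List.getElem?_eq_getElem hjlt']
    have hset : PySem.List.pySetD idxs code (p.2, (i : Int)) = idxs.set j (p.2, (i : Int)) := by
      rw [pySetD26 idxs code _ hl hcl hcu]
    set v : Int := 1 + r.getD i 0 + ((i : Int) - 1 - p.2) - (p.2 - p.1) with hv
    have step :
        way2Loop (c :: rest) i (r ++ List.replicate (c :: rest).length 0) idxs
          = way2Loop rest (i + 1) ((r ++ [v]) ++ List.replicate rest.length 0)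
              (idxs.set j (p.2, (i : Int))) := by
      show way2Loop (c :: rest) i (r ++ List.replicate (rest.length + 1) 0) idxs = _
      simp only [way2Loop]
      rw [← hcode, hget, hset,
        pyGetD_append r (rest.length + 1) i hr, pySetD_append r rest.length _ i hr]
    have stepB :
        way2AltLoop (c :: rest) i idxs acc
          = way2AltLoop rest (i + 1) (idxs.set j (p.2, (i : Int)))
              (acc + (p.2 - p.1) * ((i : Int) - p.2)) := by
      simp only [way2AltLoop]
      rw [← hcode, hget, hset]
    rw [step, stepB]
    have hsig : sig26 (idxs.set j (p.2, (i : Int)))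
        = sig26 idxs - (p.2 - p.1) + ((i : Int) - p.2) := by
      have := sum_map_set (fun q : Int × Int => q.2 - q.1) idxs j (p.2, (i : Int)) hjlt'
      simpa [sig26, ← hp] using this
    have hgap : gapF (idxs.set j (p.2, (i : Int))) ((i : Int) + 1)
        = gapF idxs ((i : Int) + 1) - (p.2 - p.1) * ((i : Int) + 1 - p.2) + ((i : Int) - p.2) := by
      have := sum_map_set (fun q : Int × Int => (q.2 - q.1) * ((i : Int) + 1 - q.2))
        idxs j (p.2, (i : Int)) hjlt'
      have h2 : ((i : Int) - p.2) * ((i : Int) + 1 - (i : Int)) = (i : Int) - p.2 := by ring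
      simpa [gapF, ← hp, h2] using this
    have hlast' : (r ++ [v]).getD (i + 1) 0 = sig26 (idxs.set j (p.2, (i : Int))) := by
      have : (r ++ [v]).getD (i + 1) 0 = v := by
        rw [← hr]
        simp [List.getD]
      rw [this, hsig, hv, hlast]
      ring
    have hsum' : (r ++ [v]).sum
        = (acc + (p.2 - p.1) * ((i : Int) - p.2))
          + gapF (idxs.set j (p.2, (i : Int))) (((i + 1 : Nat) : Int)) := by
      have hone : (((i + 1 : Nat)) : Int) = (i : Int) + 1 := by push_cast; ring
      rw [hone, hgap, gapF_succ]
      simp only [List.sum_append, List.sum_cons, List.sum_nil, hsum, hv, hlast]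
      ring
    have := ih (i + 1) (r ++ [v]) (idxs.set j (p.2, (i : Int)))
      (acc + (p.2 - p.1) * ((i : Int) - p.2))
      (by simpa using hl) (by simp [hr]) hpre' hlast' hsum'
    rw [this]
    have hcast : (((i + 1 : Nat)) : Int) + (rest.length : Int)
        = (i : Int) + ((c :: rest).length : Int) := by
      simp only [List.length_cons]; push_cast; ring
    rw [hcast]

-- ===== VERDICT (by name: the statement is the Claim_ definition above) =====
theorem way2_spec : Claim_equal_way2 := by
  intro S _ hpre
  unfold Spec_way2 way2 way2_alt
  have hpre' : ∀ c ∈ S.toList, 39 ≤ c.toNat ∧ c.toNat ≤ 90 := by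
    intro c hc
    have := List.all_eq_true.mp hpre c hc
    simpa using this
  have h0 : List.replicate (S.toList.length + 1) 0
      = ([0] : List Int) ++ List.replicate S.toList.length 0 := by
    simp [List.replicate_succ]
  have := loop_inv S.toList 0 [0] (List.replicate 26 ((-1 : Int), (-1 : Int))) 0
    (by simp) (by simp) hpre'
    (by simp [sig26])
    (by simp [gapF])
  rw [h0]
  rw [this]
  rw [foldl_add_gap]
  simp
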